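-- pv_equiv track=rewrite | github.com/p0ss/HatCatDev | scripts/analysis/analyze_kif_expansion.py | find_parent_chain
-- ===== SOURCE A (Python) =====
-- def find_parent_chain(concept, parent_map, max_depth=10):
--     """Find all ancestors of a concept up to max_depth."""
--     ancestors = set()
--     queue = [(concept, 0)]
--     visited = {concept}
--
--     while queue:
--         current, depth = queue.pop(0)
--
--         if depth >= max_depth:
--             continue
--
--         for parent in parent_map.get(current, []):
--             if parent not in visited:
--                 visited.add(parent)
--                 ancestors.add(parent)
--                 queue.append((parent, depth + 1))
--
--     return ancestors
-- ===== SOURCE B (Python) =====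
-- def find_parent_chain(concept, parent_map, max_depth=10):
--     """Find all ancestors of a concept up to max_depth, by naive fixed-point
--     closure: repeatedly add the parents of everything reached so far until
--     nothing new appears (or max_depth rounds have run)."""
--     reach = {concept}
--     for _ in range(max_depth):
--         new = {p for node in reach for p in parent_map.get(node, []) if p not in reach}
--         if not new:
--             break
--         reach |= new
--     return reach - {concept}
-- ===== Notes on version B (the rewrite author's own statement) =====
-- stated objective: alternative
-- what changed: Replaced the (node,depth)-FIFO-queue BFS (visited/ancestors bookkeeping, per-node depth check, pop(0)) by a naive fixed-point closure: each round recomputes the set of yet-unreached parents of the ENTIRE reached set with one set comprehension, unions it in, and stops early at a fixpoint; the answer is reach minus the start concept.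
import Mathlib
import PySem

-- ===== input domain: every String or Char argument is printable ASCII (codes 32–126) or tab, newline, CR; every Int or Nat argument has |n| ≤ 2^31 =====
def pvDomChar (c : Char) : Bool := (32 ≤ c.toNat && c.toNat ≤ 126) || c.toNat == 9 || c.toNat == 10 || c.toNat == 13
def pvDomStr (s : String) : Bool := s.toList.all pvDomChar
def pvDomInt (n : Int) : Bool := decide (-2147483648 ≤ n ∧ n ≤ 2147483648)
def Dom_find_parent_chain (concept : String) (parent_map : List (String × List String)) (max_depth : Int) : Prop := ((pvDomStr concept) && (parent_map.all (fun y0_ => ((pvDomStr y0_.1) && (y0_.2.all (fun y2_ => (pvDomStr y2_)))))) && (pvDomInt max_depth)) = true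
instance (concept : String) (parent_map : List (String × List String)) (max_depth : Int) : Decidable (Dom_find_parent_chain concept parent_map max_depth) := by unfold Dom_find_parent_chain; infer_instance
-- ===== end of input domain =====

-- B replaces A's (node,depth)-FIFO-queue BFS by a naive fixed-point closure: each round
-- recomputes the yet-unreached parents of the ENTIRE reached set and stops at a fixpoint
-- (no queue, no per-node depths, no frontier); same exact result, a different decomposition.
-- Python A returns a set; the ports return its elements in insertion order.

-- ===== PORT A =====
-- A's inner `for parent in parent_map.get(current, []):` body; state = (visited, ancestors, queue)
def aStep (d : Int) (st : List String × List String × List (String × Int)) (parent : String) :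
    List String × List String × List (String × Int) :=
  if PySem.Set.contains st.1 parent then st
  else (PySem.Set.add st.1 parent, PySem.Set.add st.2.1 parent, st.2.2 ++ [(parent, d + 1)])

-- candidates ever pushable, and the count of those not yet visited (termination measure only)
def pvCand (pm : List (String × List String)) : List String := pm.flatMap (·.2)
def pvFree (pm : List (String × List String)) (v : List String) : Nat :=
  (pvCand pm).countP (fun s => !(PySem.Set.contains v s))

theorem countP_lt_of_witness {l : List String} {p q : String → Bool} {x : String}
    (hx : x ∈ l) (hmono : ∀ s, q s = true → p s = true)
    (hp : p x = true) (hq : q x = false) : l.countP q < l.countP p := by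
  induction l with
  | nil => cases hx
  | cons y ys ih =>
    rcases List.mem_cons.mp hx with rfl | hy
    · have h1 : ys.countP q ≤ ys.countP p := List.countP_mono_left (fun s _ hs => hmono s hs)
      simp [hp, hq]
      omega
    · have h1 := ih hy
      simp only [List.countP_cons]
      by_cases hqy : q y = true
      · simp [hqy, hmono y hqy]; omega
      · split_ifs <;> omega

theorem free_add_lt {pm : List (String × List String)} {v : List String} {p : String}
    (hp : p ∈ pvCand pm) (hnv : PySem.Set.contains v p = false) :
    pvFree pm (PySem.Set.add v p) < pvFree pm v := by
  have hm : p ∉ v := by simpa [PySem.Set.contains] using hnv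
  have hadd : PySem.Set.add v p = v ++ [p] := by
    simp [PySem.Set.add, PySem.Set.contains, hm]
  unfold pvFree
  apply countP_lt_of_witness hp (x := p)
  · intro s hs
    simp only [hadd, Bool.not_eq_eq_eq_not, Bool.not_true, PySem.Set.contains] at hs ⊢
    simp only [List.contains_eq_mem, decide_eq_false_iff_not, List.mem_append,
      List.mem_singleton] at hs ⊢
    tauto
  · simpa [PySem.Set.contains] using hm
  · simp [hadd, PySem.Set.contains]

theorem fold_decr (pm : List (String × List String)) (d : Int) :
    ∀ (ps : List String), (∀ p ∈ ps, p ∈ pvCand pm) →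
    ∀ (v a : List String) (q : List (String × Int)),
      ((ps.foldl (aStep d) (v, a, q)).2.2).length + pvFree pm (ps.foldl (aStep d) (v, a, q)).1
        ≤ q.length + pvFree pm v := by
  intro ps
  induction ps with
  | nil => intro _ v a q; simp
  | cons p ps ih =>
    intro hmem v a q
    have hp : p ∈ pvCand pm := hmem p (List.mem_cons_self ..)
    have hps : ∀ x ∈ ps, x ∈ pvCand pm := fun x hx => hmem x (List.mem_cons_of_mem _ hx)
    simp only [List.foldl_cons]
    by_cases hc : PySem.Set.contains v p = true
    · simp only [aStep, hc, if_true]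
      exact ih hps v a q
    · have hc' : PySem.Set.contains v p = false := by simpa using hc
      simp only [aStep, hc', Bool.false_eq_true, if_false]
      have h1 := ih hps (PySem.Set.add v p) (PySem.Set.add a p) (q ++ [(p, d + 1)])
      have h2 := free_add_lt hp hc'
      simp only [List.length_append, List.length_cons, List.length_nil] at h1 ⊢
      omega

theorem getD_sub_cand (pm : List (String × List String)) (k : String) :
    ∀ p ∈ PySem.Dict.getD ⟨pm⟩ k [], p ∈ pvCand pm := by
  induction pm with
  | nil => intro p hp; simp [pysem] at hp
  | cons kv rest ih =>
    obtain ⟨k1, vs⟩ := kv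
    intro p hp
    simp only [PySem.Dict.getD, PySem.Dict.get?_mk_cons] at hp
    by_cases hk : (k1 == k) = true
    · simp only [hk, if_true, Option.getD_some] at hp
      simp only [pvCand, List.mem_flatMap]
      exact ⟨(k1, vs), List.mem_cons_self .., hp⟩
    · simp only [hk, Bool.false_eq_true, if_false] at hp
      have := ih p (by simpa [PySem.Dict.getD] using hp)
      simp only [pvCand, List.mem_flatMap] at this ⊢
      rcases this with ⟨a, hab, hpb⟩
      exact ⟨a, List.mem_cons_of_mem _ hab, hpb⟩

-- A's while-loop: pop from the front; skip if depth >= max_depth; else push unvisited parents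
def aLoop (pm : List (String × List String)) (md : Int) :
    List (String × Int) → List String → List String → List String
  | [], _, ancestors => ancestors
  | (current, depth) :: rest, visited, ancestors =>
    if depth ≥ md then aLoop pm md rest visited ancestors
    else
      let st := (PySem.Dict.getD ⟨pm⟩ current []).foldl (aStep depth) (visited, ancestors, rest)
      aLoop pm md st.2.2 st.1 st.2.1
termination_by q v _ => q.length + pvFree pm v
decreasing_by
  · simp
  · have := fold_decr pm depth (PySem.Dict.getD ⟨pm⟩ current []) (getD_sub_cand pm current)
      visited ancestors rest
    simp only [List.length_cons]
    omega

def find_parent_chain (concept : String) (parent_map : List (String × List String)) (max_depth : Int) : List String :=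
  aLoop parent_map max_depth [(concept, 0)] (PySem.Set.add PySem.Set.empty concept) PySem.Set.empty

-- ===== PORT B =====
-- the body of B's set comprehension: `p for … if p not in reach`, accumulated into the set `new`
def fxAddNew (reach : List String) (acc : List String) (p : String) : List String :=
  if PySem.Set.contains reach p then acc else PySem.Set.add acc p

-- `for p in parent_map.get(node, [])` inside the comprehension
def fxExpand (pm : List (String × List String)) (reach : List String)
    (acc : List String) (node : String) : List String :=
  (PySem.Dict.getD ⟨pm⟩ node []).foldl (fxAddNew reach) acc

-- `new = {p for node in reach for p in parent_map.get(node, []) if p not in reach}`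
def fxNew (pm : List (String × List String)) (reach : List String) : List String :=
  reach.foldl (fxExpand pm reach) PySem.Set.empty

-- `for _ in range(max_depth): …; if not new: break; reach |= new`
def fxLoop (pm : List (String × List String)) : Nat → List String → List String
  | 0, reach => reach
  | k + 1, reach =>
    let nw := fxNew pm reach
    if nw.isEmpty then reach else fxLoop pm k (PySem.Set.union reach nw)

def find_parent_chain_alt (concept : String) (parent_map : List (String × List String)) (max_depth : Int) : List String :=
  PySem.Set.diff (fxLoop parent_map max_depth.toNat (PySem.Set.add PySem.Set.empty concept))
    (PySem.Set.add PySem.Set.empty concept)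

-- ===== PRECONDITION & SPEC =====
def Spec_find_parent_chain (concept : String) (parent_map : List (String × List String)) (max_depth : Int) (out : List String) : Prop := out = find_parent_chain_alt concept parent_map max_depth
instance (concept : String) (parent_map : List (String × List String)) (max_depth : Int) (out : List String) : Decidable (Spec_find_parent_chain concept parent_map max_depth out) := by unfold Spec_find_parent_chain; infer_instance

-- ===== CLAIM (what is proved, stated in full; the proofs are below) =====
def Claim_equal_find_parent_chain : Prop := ∀ (concept : String) (parent_map : List (String × List String)) (max_depth : Int), Dom_find_parent_chain concept parent_map max_depth → Spec_find_parent_chain concept parent_map max_depth (find_parent_chain concept parent_map max_depth)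

-- ===== LEMMAS AND PROOFS =====

-- proof-only intermediate: a level-synchronous BFS, bridged to A on one side and B on the other
def bStep (st : List String × List String × List String) (parent : String) :
    List String × List String × List String :=
  if PySem.Set.contains st.1 parent then st
  else (PySem.Set.add st.1 parent, PySem.Set.add st.2.1 parent, st.2.2 ++ [parent])

def bExpand (pm : List (String × List String))
    (st : List String × List String × List String) (node : String) :
    List String × List String × List String :=
  (PySem.Dict.getD ⟨pm⟩ node []).foldl bStep st

def bLoop (pm : List (String × List String)) :
    Nat → List String → List String → List String → List String
  | 0, _, _, ancestors => ancestors
  | k + 1, frontier, visited, ancestors =>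
    if frontier.isEmpty then ancestors
    else
      let st := frontier.foldl (bExpand pm) (visited, ancestors, ([] : List String))
      bLoop pm k st.2.2 st.1 st.2.1

-- ---- A = intermediate ----

theorem inner_rel (d : Int) (ps : List String) :
    ∀ (v a : List String) (base : List (String × Int)) (nf : List String),
      ps.foldl (aStep d) (v, a, base ++ nf.map (fun p => (p, d + 1))) =
        ((ps.foldl bStep (v, a, nf)).1, (ps.foldl bStep (v, a, nf)).2.1,
          base ++ ((ps.foldl bStep (v, a, nf)).2.2).map (fun p => (p, d + 1))) := by
  induction ps with
  | nil => intro v a base nf; simp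
  | cons p ps ih =>
    intro v a base nf
    simp only [List.foldl_cons]
    by_cases hc : PySem.Set.contains v p = true
    · simp only [aStep, bStep, hc, if_true]
      exact ih v a base nf
    · simp only [aStep, bStep, hc, Bool.false_eq_true, if_false]
      have := ih (PySem.Set.add v p) (PySem.Set.add a p) base (nf ++ [p])
      simpa [List.map_append, List.append_assoc] using this

theorem level_step (pm : List (String × List String)) (md d : Int) (hd : d < md) :
    ∀ (cur : List String) (v a nf : List String),
      aLoop pm md (cur.map (fun p => (p, d)) ++ nf.map (fun p => (p, d + 1))) v a =
        aLoop pm md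
          (((cur.foldl (bExpand pm) (v, a, nf)).2.2).map (fun p => (p, d + 1)))
          (cur.foldl (bExpand pm) (v, a, nf)).1
          (cur.foldl (bExpand pm) (v, a, nf)).2.1 := by
  intro cur
  induction cur with
  | nil => intro v a nf; simp
  | cons c cs ih =>
    intro v a nf
    simp only [List.map_cons, List.cons_append]
    rw [aLoop]
    rw [if_neg (by omega : ¬ d ≥ md)]
    have hrel := inner_rel d (PySem.Dict.getD ⟨pm⟩ c []) v a (cs.map (fun p => (p, d))) nf
    simp only [hrel]
    rw [ih]
    simp only [List.foldl_cons, bExpand]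

theorem skip_all (pm : List (String × List String)) (md : Int) :
    ∀ (q : List (String × Int)) (v a : List String),
      (∀ x ∈ q, md ≤ x.2) → aLoop pm md q v a = a := by
  intro q
  induction q with
  | nil => intro v a _; rw [aLoop]
  | cons x rest ih =>
    intro v a h
    obtain ⟨c, depth⟩ := x
    rw [aLoop]
    have hmd : md ≤ depth := h (c, depth) (List.mem_cons_self ..)
    simp only [ge_iff_le, hmd, if_true]
    exact ih v a (fun y hy => h y (List.mem_cons_of_mem _ hy))

theorem levels (pm : List (String × List String)) (md : Int) :
    ∀ (k : Nat) (d : Int), d + k = md →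
    ∀ (fr v a : List String),
      aLoop pm md (fr.map (fun p => (p, d))) v a = bLoop pm k fr v a := by
  intro k
  induction k with
  | zero =>
    intro d hdk fr v a
    rw [bLoop]
    apply skip_all
    intro x hx
    simp only [List.mem_map] at hx
    obtain ⟨p, _, rfl⟩ := hx
    omega
  | succ k ih =>
    intro d hdk fr v a
    rw [bLoop]
    cases fr with
    | nil => simp [aLoop, List.isEmpty_nil]
    | cons f fs =>
      simp only [List.isEmpty_cons, Bool.false_eq_true, if_false]
      have hd : d < md := by omega
      have h1 := level_step pm md d hd (f :: fs) v a []
      simp only [List.map_nil, List.append_nil] at h1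
      rw [h1]
      exact ih (d + 1) (by omega) _ _ _

-- ---- intermediate = B ----

theorem bLoop_nil_frontier (pm : List (String × List String)) :
    ∀ (k : Nat) (v a : List String), bLoop pm k [] v a = a := by
  intro k v a; cases k <;> simp [bLoop]

-- parents already in `reach` contribute nothing to the comprehension
theorem fx_inner_closed (reach : List String) (ps : List String) :
    ∀ acc, (∀ p ∈ ps, p ∈ reach) → ps.foldl (fxAddNew reach) acc = acc := by
  induction ps with
  | nil => intro acc _; rfl
  | cons p ps ih =>
    intro acc h
    have hp : p ∈ reach := h p (List.mem_cons_self ..)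
    simp only [List.foldl_cons, fxAddNew, (PySem.Set.contains_iff _ _).mpr hp, if_true]
    exact ih acc (fun x hx => h x (List.mem_cons_of_mem _ hx))

theorem fx_nodes_closed (pm : List (String × List String)) (reach : List String)
    (pre : List String) (acc : List String)
    (h : ∀ n ∈ pre, ∀ p ∈ PySem.Dict.getD ⟨pm⟩ n [], p ∈ reach) :
    pre.foldl (fxExpand pm reach) acc = acc := by
  induction pre generalizing acc with
  | nil => rfl
  | cons n ns ih =>
    simp only [List.foldl_cons, fxExpand]
    rw [fx_inner_closed reach _ acc (h n (List.mem_cons_self ..))]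
    exact ih acc (fun x hx => h x (List.mem_cons_of_mem _ hx))

-- monotonicity, disjointness from reach, and coverage of the comprehension's accumulator
theorem fx_inner_mono (reach : List String) (ps : List String) :
    ∀ acc x, x ∈ acc → x ∈ ps.foldl (fxAddNew reach) acc := by
  induction ps with
  | nil => intro acc x hx; exact hx
  | cons p ps ih =>
    intro acc x hx
    simp only [List.foldl_cons]
    apply ih
    unfold fxAddNew
    split
    · exact hx
    · exact (PySem.Set.mem_add ..).mpr (Or.inl hx)

theorem fx_inner_disj (reach : List String) (ps : List String) :
    ∀ acc, (∀ x ∈ acc, x ∉ reach) →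
      ∀ x ∈ ps.foldl (fxAddNew reach) acc, x ∉ reach := by
  induction ps with
  | nil => intro acc h; exact h
  | cons p ps ih =>
    intro acc h
    simp only [List.foldl_cons]
    apply ih
    intro x hx
    unfold fxAddNew at hx
    by_cases hc : PySem.Set.contains reach p = true
    · rw [if_pos hc] at hx; exact h x hx
    · rw [if_neg hc] at hx
      rcases (PySem.Set.mem_add ..).mp hx with h1 | rfl
      · exact h x h1
      · exact fun hr => hc ((PySem.Set.contains_iff _ _).mpr hr)

theorem fx_inner_nodup (reach : List String) (ps : List String) :
    ∀ acc, acc.Nodup → (ps.foldl (fxAddNew reach) acc).Nodup := by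
  induction ps with
  | nil => intro acc h; exact h
  | cons p ps ih =>
    intro acc h
    simp only [List.foldl_cons]
    apply ih
    unfold fxAddNew
    split
    · exact h
    · exact PySem.Set.nodup_add _ _ h

theorem fx_inner_covers (reach : List String) (ps : List String) :
    ∀ acc p, p ∈ ps → p ∈ reach ∨ p ∈ ps.foldl (fxAddNew reach) acc := by
  induction ps with
  | nil => intro acc p hp; cases hp
  | cons q ps ih =>
    intro acc p hp
    simp only [List.foldl_cons]
    rcases List.mem_cons.mp hp with rfl | hp'
    · by_cases hc : p ∈ reach
      · exact Or.inl hc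
      · right
        apply fx_inner_mono
        unfold fxAddNew
        rw [if_neg (fun h => hc ((PySem.Set.contains_iff _ _).mp h))]
        exact (PySem.Set.mem_add ..).mpr (Or.inr rfl)
    · exact ih _ p hp'

theorem fx_nodes_mono (pm : List (String × List String)) (reach : List String)
    (fr : List String) : ∀ acc x, x ∈ acc → x ∈ fr.foldl (fxExpand pm reach) acc := by
  induction fr with
  | nil => intro acc x hx; exact hx
  | cons n ns ih =>
    intro acc x hx
    simp only [List.foldl_cons]
    exact ih _ x (fx_inner_mono reach _ acc x hx)

theorem fx_nodes_disj (pm : List (String × List String)) (reach : List String)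
    (fr : List String) : ∀ acc, (∀ x ∈ acc, x ∉ reach) →
      ∀ x ∈ fr.foldl (fxExpand pm reach) acc, x ∉ reach := by
  induction fr with
  | nil => intro acc h; exact h
  | cons n ns ih =>
    intro acc h
    simp only [List.foldl_cons]
    exact ih _ (fx_inner_disj reach _ acc h)

theorem fx_nodes_nodup (pm : List (String × List String)) (reach : List String)
    (fr : List String) : ∀ acc, acc.Nodup → (fr.foldl (fxExpand pm reach) acc).Nodup := by
  induction fr with
  | nil => intro acc h; exact h
  | cons n ns ih =>
    intro acc h
    simp only [List.foldl_cons]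
    exact ih _ (fx_inner_nodup reach _ acc h)

theorem fx_nodes_covers (pm : List (String × List String)) (reach : List String)
    (fr : List String) : ∀ acc n, n ∈ fr → ∀ p ∈ PySem.Dict.getD ⟨pm⟩ n [],
      p ∈ reach ∨ p ∈ fr.foldl (fxExpand pm reach) acc := by
  induction fr with
  | nil => intro acc n hn; cases hn
  | cons m ms ih =>
    intro acc n hn p hp
    simp only [List.foldl_cons]
    rcases List.mem_cons.mp hn with rfl | hn'
    · rcases fx_inner_covers reach _ acc p hp with h | h
      · exact Or.inl h
      · exact Or.inr (fx_nodes_mono pm reach ms _ p h)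
    · exact ih _ n hn' p hp

-- B's comprehension over the frontier is in lock-step with the intermediate's bStep fold
theorem fx_b_inner (reach a : List String) (ha : ∀ x ∈ a, x ∈ reach) (ps : List String) :
    ∀ acc, (∀ x ∈ acc, x ∉ reach) →
      ps.foldl bStep (reach ++ acc, a ++ acc, acc) =
        (reach ++ ps.foldl (fxAddNew reach) acc, a ++ ps.foldl (fxAddNew reach) acc,
          ps.foldl (fxAddNew reach) acc) := by
  induction ps with
  | nil => intro acc _; rfl
  | cons p ps ih =>
    intro acc hacc
    simp only [List.foldl_cons]
    by_cases hr : p ∈ reach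
    · have hv : PySem.Set.contains (reach ++ acc) p = true :=
        (PySem.Set.contains_iff _ _).mpr (List.mem_append.mpr (Or.inl hr))
      simp only [bStep, fxAddNew, hv, (PySem.Set.contains_iff _ _).mpr hr, if_true]
      exact ih acc hacc
    · have hrc : PySem.Set.contains reach p = false := by
        by_contra h
        exact hr ((PySem.Set.contains_iff _ _).mp (by simpa using h))
      by_cases hac : p ∈ acc
      · have hv : PySem.Set.contains (reach ++ acc) p = true :=
          (PySem.Set.contains_iff _ _).mpr (List.mem_append.mpr (Or.inr hac))
        simp only [bStep, fxAddNew, hv, hrc, Bool.false_eq_true, if_false, if_true,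
          PySem.Set.add_of_mem hac]
        exact ih acc hacc
      · have hvp : p ∉ reach ++ acc := by
          intro hm
          rcases List.mem_append.mp hm with h1 | h1
          · exact hr h1
          · exact hac h1
        have hva : p ∉ a ++ acc := by
          intro hm
          rcases List.mem_append.mp hm with h1 | h1
          · exact hr (ha p h1)
          · exact hac h1
        have hv : PySem.Set.contains (reach ++ acc) p = false := by
          cases hb : PySem.Set.contains (reach ++ acc) p with
          | false => rfl
          | true => exact absurd ((PySem.Set.contains_iff _ _).mp hb) hvp
        simp only [bStep, fxAddNew, hv, hrc, Bool.false_eq_true, if_false]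
        rw [PySem.Set.add_of_not_mem hvp, PySem.Set.add_of_not_mem hva,
          PySem.Set.add_of_not_mem hac]
        have := ih (acc ++ [p]) (by
          intro x hx
          rcases List.mem_append.mp hx with h1 | h1
          · exact hacc x h1
          · simp only [List.mem_singleton] at h1; subst h1; exact hr)
        simpa [List.append_assoc] using this

theorem fx_b_nodes (pm : List (String × List String)) (reach a : List String)
    (ha : ∀ x ∈ a, x ∈ reach) (fr : List String) :
    ∀ acc, (∀ x ∈ acc, x ∉ reach) →
      fr.foldl (bExpand pm) (reach ++ acc, a ++ acc, acc) =
        (reach ++ fr.foldl (fxExpand pm reach) acc, a ++ fr.foldl (fxExpand pm reach) acc,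
          fr.foldl (fxExpand pm reach) acc) := by
  induction fr with
  | nil => intro acc _; rfl
  | cons n ns ih =>
    intro acc hacc
    simp only [List.foldl_cons, bExpand, fxExpand]
    rw [fx_b_inner reach a ha _ acc hacc]
    exact ih _ (fx_inner_disj reach _ acc hacc)

theorem union_disjoint (reach nw : List String) (hn : nw.Nodup)
    (hd : ∀ x ∈ nw, x ∉ reach) : PySem.Set.union reach nw = reach ++ nw := by
  have h1 : PySem.Set.union reach nw = PySem.Set.update reach nw := rfl
  rw [h1]
  exact PySem.Set.update_eq_append_of_disjoint reach nw hn hd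

theorem diff_head (concept : String) (a : List String) (h : concept ∉ a) :
    PySem.Set.diff (concept :: a) (PySem.Set.add PySem.Set.empty concept) = a := by
  have hsingle : PySem.Set.add PySem.Set.empty concept = [concept] := by
    simp [PySem.Set.add, PySem.Set.empty]
  rw [hsingle]
  simp only [PySem.Set.diff]
  rw [List.filter_cons]
  have hcc : (!(PySem.Set.contains [concept] concept)) = false := by
    simp [PySem.Set.contains]
  rw [hcc]
  simp only [Bool.false_eq_true, if_false]
  apply List.filter_eq_self.mpr
  intro x hx
  have hne : x ≠ concept := fun he => h (he ▸ hx)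
  simp [PySem.Set.contains, hne]

-- the main bridge: the fixpoint loop on `reach = pre ++ fr` (parents of `pre` all reached)
-- equals the level-synchronous BFS on frontier `fr`
theorem fx_eq_b (pm : List (String × List String)) (concept : String) :
    ∀ (k : Nat) (pre fr a : List String),
      pre ++ fr = concept :: a → concept ∉ a →
      (∀ n ∈ pre, ∀ p ∈ PySem.Dict.getD ⟨pm⟩ n [], p ∈ pre ++ fr) →
      PySem.Set.diff (fxLoop pm k (pre ++ fr)) (PySem.Set.add PySem.Set.empty concept) =
        bLoop pm k fr (pre ++ fr) a := by
  intro k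
  induction k with
  | zero =>
    intro pre fr a hra hc _
    rw [fxLoop, bLoop, hra]
    exact diff_head concept a hc
  | succ k ih =>
    intro pre fr a hra hc hcl
    have ha : ∀ x ∈ a, x ∈ pre ++ fr := by
      intro x hx; rw [hra]; exact List.mem_cons_of_mem _ hx
    have hnew : fxNew pm (pre ++ fr) = fr.foldl (fxExpand pm (pre ++ fr)) [] := by
      unfold fxNew
      rw [List.foldl_append, fx_nodes_closed pm (pre ++ fr) pre PySem.Set.empty hcl]
      rfl
    set F := fr.foldl (fxExpand pm (pre ++ fr)) [] with hF
    have hFd : ∀ x ∈ F, x ∉ pre ++ fr :=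
      fx_nodes_disj pm (pre ++ fr) fr [] (by intro x hx; cases hx)
    have hFn : F.Nodup := fx_nodes_nodup pm (pre ++ fr) fr [] List.nodup_nil
    rw [fxLoop, bLoop]
    simp only [hnew]
    by_cases hfr : fr = []
    · have hFnil : F = [] := by rw [hF, hfr]; rfl
      have h1 : F.isEmpty = true := by rw [hFnil]; rfl
      have h2 : fr.isEmpty = true := by rw [hfr]; rfl
      simp only [h1, h2, if_true]
      rw [hra]
      exact diff_head concept a hc
    · have h2 : fr.isEmpty = false := by
        cases fr with
        | nil => exact absurd rfl hfr
        | cons f fs => rfl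
      simp only [h2, Bool.false_eq_true, if_false]
      have hfold := fx_b_nodes pm (pre ++ fr) a ha fr [] (by intro x hx; cases hx)
      simp only [List.append_nil, ← hF] at hfold
      rw [hfold]
      by_cases hFe : F = []
      · have h1 : F.isEmpty = true := by rw [hFe]; rfl
        simp only [hFe, List.isEmpty_nil, if_true, List.append_nil]
        rw [bLoop_nil_frontier]
        rw [hra]
        exact diff_head concept a hc
      · have h1 : F.isEmpty = false := by
          cases hFc : F with
          | nil => exact absurd hFc hFe
          | cons g gs => rfl
        simp only [h1, Bool.false_eq_true, if_false]
        rw [union_disjoint (pre ++ fr) F hFn hFd]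
        have := ih (pre ++ fr) F (a ++ F)
          (by rw [hra]; simp)
          (by
            intro h
            rcases List.mem_append.mp h with hx1 | hx1
            · exact hc hx1
            · exact hFd concept hx1 (by rw [hra]; exact List.mem_cons_self ..))
          (by
            intro n hn p hp
            rcases List.mem_append.mp hn with hx1 | hx1
            · exact List.mem_append.mpr (Or.inl (hcl n hx1 p hp))
            · rcases fx_nodes_covers pm (pre ++ fr) fr [] n hx1 p hp with h3 | h3
              · exact List.mem_append.mpr (Or.inl h3)
              · exact List.mem_append.mpr (Or.inr (hF ▸ h3)))
        simpa using this

-- ===== VERDICT (by name: the statement is the Claim_ definition above) =====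
theorem find_parent_chain_spec : Claim_equal_find_parent_chain := by
  intro concept pm md _
  unfold Spec_find_parent_chain find_parent_chain find_parent_chain_alt
  have hsingle : PySem.Set.add PySem.Set.empty concept = [concept] := by
    simp [PySem.Set.add, PySem.Set.empty]
  have halt := fx_eq_b pm concept md.toNat [] [concept] []
    (by simp) (by simp) (by intro n hn; cases hn)
  simp only [List.nil_append] at halt
  rw [hsingle] at halt
  rw [hsingle, halt]
  by_cases hmd : 0 < md
  · have h := levels pm md md.toNat 0 (by omega) [concept] [concept] []
    simp only [List.map_cons, List.map_nil] at h
    exact h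
  · have hz : md.toNat = 0 := by omega
    rw [hz, bLoop]
    apply skip_all
    intro x hx
    simp only [List.mem_singleton] at hx
    subst hx
    simpa using by omega
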